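-- pv_equiv track=rewrite | github.com/gongweii/test | process_map/eu_generate_map/clean_item_with_shape_pipe2_plus.py | compare_by_shape
-- ===== SOURCE A (Python) =====
-- def compare_by_shape(org,ticker):
--   first_alpha = ticker[0].lower()
--   if org.find(first_alpha) != -1:
--     pre_index = org.find(first_alpha) + 1
--     ticker_index = [0]
--     for c in ticker[1:].lower():
--       ticker_index.append(org.lower().find(c,pre_index))
--       pre_index = max(pre_index, org.lower().find(c,pre_index)) + 1
--     if float(len([x for x in ticker_index if x != -1]))/len(ticker) >= 0.6:
--       return True
--   return False
-- ===== SOURCE B (Python) =====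
-- def compare_by_shape(org, ticker):
--     first_alpha = ticker[0].lower()
--     start = org.find(first_alpha)
--     if start == -1:
--         return False
--     org_l = org.lower()
--     # occurrence lists: char -> ascending list of its positions in org_l
--     pos = {}
--     for i, ch in enumerate(org_l):
--         pos.setdefault(ch, []).append(i)
--     ptr = {}          # per-char cursor into its occurrence list
--     hits = 1          # ticker[0] always counts (A records index 0 for it)
--     pre_index = start + 1
--     for c in ticker[1:].lower():
--         lst = pos.get(c, [])
--         j = ptr.get(c, 0)
--         while j < len(lst) and lst[j] < pre_index:
--             j += 1
--         ptr[c] = j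
--         if j < len(lst):
--             pre_index = lst[j] + 1
--             hits += 1
--         else:
--             pre_index += 1
--     return float(hits) / len(ticker) >= 0.6
-- ===== Notes on version B (the rewrite author's own statement) =====
-- stated objective: faster
-- what changed: B lowercases org once and builds a char->ascending-positions index with a per-char cursor advanced monotonically, replacing A's per-ticker-char org.lower() recomputation and linear find scans; the fuzzy-match ratio is kept as a running hit counter instead of a collected index list.
import Mathlib
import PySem

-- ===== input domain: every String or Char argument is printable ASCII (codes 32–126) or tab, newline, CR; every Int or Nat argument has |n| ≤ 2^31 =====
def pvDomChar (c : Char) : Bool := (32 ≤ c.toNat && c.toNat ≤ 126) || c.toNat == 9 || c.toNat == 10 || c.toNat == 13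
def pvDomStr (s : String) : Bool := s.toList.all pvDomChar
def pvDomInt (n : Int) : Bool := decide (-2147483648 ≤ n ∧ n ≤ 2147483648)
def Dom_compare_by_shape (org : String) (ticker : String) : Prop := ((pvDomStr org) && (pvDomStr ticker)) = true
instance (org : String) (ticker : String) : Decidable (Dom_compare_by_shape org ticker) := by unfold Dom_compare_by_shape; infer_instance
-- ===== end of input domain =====

-- B lowercases org once and replaces A's per-ticker-char linear find scans by a
-- char -> ascending-positions index with per-char cursors advanced monotonically.
-- In both ports the Python comparison float(count)/len(ticker) >= 0.6 is ported as
-- 10*count ≥ 6*len(ticker), which is exactly what the IEEE-double comparison decides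
-- for integer counts/lengths of these magnitudes.

-- ===== PORT A =====
def compare_by_shape (org : String) (ticker : String) : Bool :=
  -- ticker[0] raises IndexError on empty ticker: excluded by Pre_compare_by_shape
  match PySem.Str.pyGet? ticker 0 with
  | none => false
  | some t0 =>
    let first_alpha : List Char := [PySem.Chars.lowerChar t0]
    if PySem.Chars.find org.toList first_alpha ≠ -1 then
      let pre_index : Int := PySem.Chars.find org.toList first_alpha + 1
      let res := (PySem.Chars.lower (List.drop 1 ticker.toList)).foldl
        (fun (st : List Int × Int) c =>
          (st.1 ++ [PySem.Chars.findFrom (PySem.Chars.lower org.toList) [c] st.2 none],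
           max st.2 (PySem.Chars.findFrom (PySem.Chars.lower org.toList) [c] st.2 none) + 1))
        ([0], pre_index)
      if 6 * (ticker.toList.length : Int) ≤ 10 * ((res.1.filter (fun x => x ≠ -1)).length : Int)
      then true else false
    else false

-- ===== PORT B =====
-- the `while j < len(lst) and lst[j] < pre_index: j += 1` loop of Source B
def pvAdvance (lst : List Int) (j : Nat) (pre : Int) : Nat :=
  if h : j < lst.length then
    if lst[j] < pre then pvAdvance lst (j + 1) pre else j
  else j
termination_by lst.length - j

def compare_by_shape_alt (org : String) (ticker : String) : Bool :=
  match PySem.Str.pyGet? ticker 0 with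
  | none => false
  | some t0 =>
    let first_alpha : List Char := [PySem.Chars.lowerChar t0]
    let start := PySem.Chars.find org.toList first_alpha
    if start = -1 then false
    else
      let orgl := PySem.Chars.lower org.toList
      -- pos.setdefault(ch, []).append(i) over enumerate(org_l)
      let pos := (PySem.List.enumerate orgl).foldl
        (fun (d : PySem.Dict Char (List Int)) p => d.modify p.2 [] (· ++ [p.1]))
        PySem.Dict.empty
      let fin := (PySem.Chars.lower (List.drop 1 ticker.toList)).foldl
        (fun (st : PySem.Dict Char Nat × Int × Int) c =>
          let lst := pos.getD c []
          let j := pvAdvance lst (st.1.getD c 0) st.2.2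
          let ptr' := st.1.insert c j
          if h : j < lst.length then (ptr', st.2.1 + 1, lst[j] + 1)
          else (ptr', st.2.1, st.2.2 + 1))
        (PySem.Dict.empty, 1, start + 1)
      6 * (ticker.toList.length : Int) ≤ 10 * fin.2.1

-- ===== PRECONDITION & SPEC =====
-- A evaluates ticker[0], which raises IndexError on an empty ticker; only that input is excluded.
def Pre_compare_by_shape (org : String) (ticker : String) : Prop := ticker ≠ ""
instance (org : String) (ticker : String) : Decidable (Pre_compare_by_shape org ticker) := by
  unfold Pre_compare_by_shape; infer_instance
def pvWitness_compare_by_shape : String × String := ("Apple Inc.", "AAPL")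

def Spec_compare_by_shape (org : String) (ticker : String) (out : Bool) : Prop :=
  out = compare_by_shape_alt org ticker
instance (org : String) (ticker : String) (out : Bool) : Decidable (Spec_compare_by_shape org ticker out) := by
  unfold Spec_compare_by_shape; infer_instance

-- ===== CLAIM (what is proved, stated in full; the proofs are below) =====
def Claim_equal_compare_by_shape : Prop := ∀ (org : String) (ticker : String),
  Dom_compare_by_shape org ticker → Pre_compare_by_shape org ticker →
  Spec_compare_by_shape org ticker (compare_by_shape org ticker)

-- ===== LEMMAS AND PROOFS =====



theorem pvAdvance_spec (lst : List Int) (j0 : Nat) (pre : Int)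
    (hj0 : j0 ≤ lst.length) (hlt : ∀ i (hi : i < lst.length), i < j0 → lst[i] < pre) :
    j0 ≤ pvAdvance lst j0 pre ∧ pvAdvance lst j0 pre ≤ lst.length ∧
      (∀ i (hi : i < lst.length), i < pvAdvance lst j0 pre → lst[i] < pre) ∧
      (∀ h : pvAdvance lst j0 pre < lst.length, pre ≤ lst[pvAdvance lst j0 pre]) := by
  fun_induction pvAdvance lst j0 pre with
  | case1 j h hl ih =>
    obtain ⟨i1, i2, i3, i4⟩ := ih (by omega)
      (fun i hi hij => by rcases Nat.lt_or_ge i j with h' | h'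
                          · exact hlt i hi h'
                          · have : i = j := by omega
                            subst this; exact hl)
    exact ⟨by omega, i2, i3, i4⟩
  | case2 j h hl =>
    
    exact ⟨le_refl _, by omega, fun i hi hij => hlt i hi hij, fun _ => by omega⟩
  | case3 j h =>
    
    exact ⟨le_refl _, by omega, fun i hi hij => hlt i hi hij, fun h' => absurd h' h⟩

def pvOcc (l : List Char) (c : Char) : List Int :=
  ((PySem.List.enumerate l).filter (fun p => p.2 == c)).map (·.1)

theorem pvOcc_sorted (l : List Char) (c : Char) : (pvOcc l c).Pairwise (· < ·) := by
  unfold pvOcc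
  rw [List.pairwise_map]
  exact (PySem.List.pairwise_lt_enumerate l 0).filter _

theorem mem_pvOcc (l : List Char) (c : Char) (i : Int) :
    i ∈ pvOcc l c ↔ 0 ≤ i ∧ ∃ h : i.toNat < l.length, l[i.toNat] = c := by
  unfold pvOcc
  simp only [List.mem_map, List.mem_filter, PySem.List.mem_enumerate_iff]
  constructor
  · rintro ⟨p, ⟨⟨k, hk, rfl⟩, hc⟩, rfl⟩
    simp only [zero_add] at *
    refine ⟨by positivity, by simpa using hk, ?_⟩
    simpa using beq_iff_eq.mp hc
  · rintro ⟨h0, hk, hc⟩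
    exact ⟨(i, l[i.toNat]), ⟨⟨i.toNat, hk, by simp [h0]⟩, by simp [hc]⟩, rfl⟩

theorem pvFindFrom_of_gt (s sub : List Char) (k : Int) (hk : (s.length : Int) < k) :
    PySem.Chars.findFrom s sub k none = -1 := by
  simp only [PySem.Chars.findFrom]
  have h0 : ¬ k < 0 := by omega
  simp [h0, hk]

theorem pvSingleton_prefix (c : Char) (l : List Char) : ([c] <+: l) ↔ l.head? = some c := by
  cases l with
  | nil => simp
  | cons x xs => simp [List.cons_prefix_cons, eq_comm]

theorem pvSingleton_prefix_drop (c : Char) (l : List Char) (n : Nat) :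
    ([c] <+: l.drop n) ↔ l[n]? = some c := by
  rw [pvSingleton_prefix, List.head?_drop]

-- membership of pvOcc in getElem? form
theorem mem_pvOcc' (l : List Char) (c : Char) (i : Int) :
    i ∈ pvOcc l c ↔ 0 ≤ i ∧ l[i.toNat]? = some c := by
  rw [mem_pvOcc]
  constructor
  · rintro ⟨h0, hk, hc⟩; exact ⟨h0, by rw [List.getElem?_eq_getElem hk, hc]⟩
  · rintro ⟨h0, hc⟩
    have hk : i.toNat < l.length := by
      by_contra h
      rw [List.getElem?_eq_none (by omega)] at hc; simp at hc
    exact ⟨h0, hk, by rw [List.getElem?_eq_getElem hk] at hc; exact Option.some.inj hc⟩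

theorem pvPos_getD (orgl : List Char) (c : Char) :
    (((PySem.List.enumerate orgl).foldl
        (fun (d : PySem.Dict Char (List Int)) p => d.modify p.2 [] (· ++ [p.1]))
        PySem.Dict.empty).getD c []) = pvOcc orgl c := by
  have h : (PySem.List.enumerate orgl).foldl
        (fun (d : PySem.Dict Char (List Int)) p => d.modify p.2 [] (· ++ [p.1]))
        PySem.Dict.empty
      = ((PySem.List.enumerate orgl).map (fun p => (p.2, p.1))).foldl
        (fun (d : PySem.Dict Char (List Int)) p => d.modify p.1 [] (· ++ [p.2]))
        PySem.Dict.empty := by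
    rw [List.foldl_map]
  rw [h, PySem.Dict.getD_foldl_modify_append]
  simp only [pvOcc, PySem.Dict.getD_empty, List.filter_map, Function.comp_def, List.nil_append,
    List.map_map]

theorem pvOcc_lt_length (l : List Char) (c : Char) (i : Int) (h : i ∈ pvOcc l c) :
    0 ≤ i ∧ i < (l.length : Int) := by
  rw [mem_pvOcc] at h
  obtain ⟨h0, hk, _⟩ := h
  omega

theorem pvFindFrom_char (orgl : List Char) (c : Char) (pre : Int) (hpre : 0 ≤ pre)
    (j : Nat) (hj : j ≤ (pvOcc orgl c).length)
    (hlt : ∀ i (hi : i < (pvOcc orgl c).length), i < j → (pvOcc orgl c)[i] < pre)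
    (hge : ∀ h : j < (pvOcc orgl c).length, pre ≤ (pvOcc orgl c)[j]) :
    PySem.Chars.findFrom orgl [c] pre none =
      if h : j < (pvOcc orgl c).length then (pvOcc orgl c)[j] else -1 := by
  set lst := pvOcc orgl c with hlst
  have hcast : pre = ((pre.toNat : Nat) : Int) := (Int.toNat_of_nonneg hpre).symm
  by_cases hlen : pre.toNat ≤ orgl.length
  · by_cases h : j < lst.length
    · rw [dif_pos h]
      set m := lst[j] with hm
      have hmem : m ∈ lst := List.getElem_mem h
      have hmocc := (mem_pvOcc' orgl c m).mp hmem
      have hprem : pre ≤ m := hge h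
      -- findFrom is not -1
      have hinf : [c] <:+: orgl.drop pre.toNat := by
        have hpref : [c] <+: orgl.drop m.toNat := (pvSingleton_prefix_drop c orgl m.toNat).mpr hmocc.2
        have hsuf : orgl.drop m.toNat <:+ orgl.drop pre.toNat := by
          rw [show m.toNat = pre.toNat + (m.toNat - pre.toNat) by omega, ← List.drop_drop]
          exact List.drop_suffix _ _
        exact hpref.isInfix.trans hsuf.isInfix
      have hne : PySem.Chars.findFrom orgl [c] ((pre.toNat : Nat) : Int) none ≠ -1 := fun hEq =>
        ((PySem.Chars.findFrom_natCast_eq_neg_one_iff orgl [c] pre.toNat hlen).mp hEq) hinf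
      rw [hcast]
      obtain ⟨hr1, hr2, hr3⟩ := PySem.Chars.findFrom_natCast_spec orgl [c] pre.toNat hlen hne
      set r := PySem.Chars.findFrom orgl [c] ((pre.toNat : Nat) : Int) none with hr
      have hr0 : 0 ≤ r := le_trans (by positivity) hr1
      have hrc : orgl[r.toNat]? = some c := (pvSingleton_prefix_drop c orgl r.toNat).mp hr2
      have hrmem : r ∈ lst := (mem_pvOcc' orgl c r).mpr ⟨hr0, hrc⟩
      -- r = lst[i'] for some i'; i' ≥ j so m ≤ r
      obtain ⟨i', hi', hri⟩ := List.mem_iff_getElem.mp hrmem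
      have hsortP : lst.Pairwise (· < ·) := by rw [hlst]; exact pvOcc_sorted orgl c
      have hmr : m ≤ r := by
        rcases Nat.lt_or_ge i' j with hij | hij
        · exfalso
          have := hlt i' hi' hij
          omega
        · rcases Nat.eq_or_lt_of_le hij with rfl | hij'
          · omega
          · have := (List.pairwise_iff_getElem.mp hsortP) j i' h hi' hij'
            omega
      have hrm : r ≤ m := by
        by_contra hcon
        have hmc : [c] <+: orgl.drop m.toNat := (pvSingleton_prefix_drop c orgl m.toNat).mpr hmocc.2
        exact hr3 m.toNat (by omega) (by omega) hmc
      omega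
    · rw [dif_neg h]
      have hjlen : j = lst.length := by omega
      rw [hcast, PySem.Chars.findFrom_natCast_eq_neg_one_iff orgl [c] pre.toNat hlen]
      intro hcon
      obtain ⟨l₁, l₂, hsplit⟩ := hcon
      -- [c] occurs in orgl.drop pre.toNat at position l₁.length
      have : (orgl.drop pre.toNat)[l₁.length]? = some c := by
        rw [← hsplit]
        simp
      rw [List.getElem?_drop] at this
      have hmem : ((pre.toNat + l₁.length : Nat) : Int) ∈ lst :=
        (mem_pvOcc' orgl c _).mpr ⟨by positivity, by rw [Int.toNat_natCast]; exact this⟩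
      obtain ⟨i', hi', hri⟩ := List.mem_iff_getElem.mp hmem
      have := hlt i' hi' (by omega)
      omega
  · -- pre beyond the end: both sides are -1
    have hgt : (orgl.length : Int) < pre := by omega
    rw [pvFindFrom_of_gt orgl [c] pre hgt]
    have : ¬ j < lst.length := by
      intro h
      have h1 := hge h
      have h2 := pvOcc_lt_length orgl c lst[j] (List.getElem_mem h)
      omega
    rw [dif_neg this]

def pvInv (orgl : List Char) (ptr : PySem.Dict Char Nat) (pre : Int) : Prop :=
  ∀ c : Char, ptr.getD c 0 ≤ (pvOcc orgl c).length ∧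
    ∀ i (hi : i < (pvOcc orgl c).length), i < ptr.getD c 0 → (pvOcc orgl c)[i] < pre

def pvStepB (orgl : List Char) (st : PySem.Dict Char Nat × Int × Int) (c : Char) :
    PySem.Dict Char Nat × Int × Int :=
  let lst := pvOcc orgl c
  let j := pvAdvance lst (st.1.getD c 0) st.2.2
  let ptr' := st.1.insert c j
  if h : j < lst.length then (ptr', st.2.1 + 1, lst[j] + 1)
  else (ptr', st.2.1, st.2.2 + 1)

def pvStepA (orgl : List Char) (st : List Int × Int) (c : Char) : List Int × Int :=
  (st.1 ++ [PySem.Chars.findFrom orgl [c] st.2 none],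
   max st.2 (PySem.Chars.findFrom orgl [c] st.2 none) + 1)

theorem pvLoop_agree (orgl : List Char) (cs : List Char) (acc : List Int) (pre : Int)
    (ptr : PySem.Dict Char Nat) (hits : Int)
    (hpre : 1 ≤ pre) (hinv : pvInv orgl ptr pre)
    (hhits : hits = ((acc.filter (fun x => x ≠ -1)).length : Int)) :
    (cs.foldl (pvStepB orgl) (ptr, hits, pre)).2.1
    = ((((cs.foldl (pvStepA orgl) (acc, pre)).1.filter (fun x => x ≠ -1)).length : Int) : Int) := by
  induction cs generalizing acc pre ptr hits with
  | nil => simpa using hhits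
  | cons c cs' ih =>
    simp only [List.foldl_cons]
    obtain ⟨hj0, hlt0⟩ := hinv c
    obtain ⟨h1, h2, h3, h4⟩ := pvAdvance_spec (pvOcc orgl c) (ptr.getD c 0) pre hj0 hlt0
    have hff := pvFindFrom_char orgl c pre (by omega) (pvAdvance (pvOcc orgl c) (ptr.getD c 0) pre)
      h2 h3 h4
    by_cases hcase : pvAdvance (pvOcc orgl c) (ptr.getD c 0) pre < (pvOcc orgl c).length
    · rw [dif_pos hcase] at hff
      set j := pvAdvance (pvOcc orgl c) (ptr.getD c 0) pre with hjdef
      have hpj : pre ≤ (pvOcc orgl c)[j] := h4 hcase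
      have hBstep : pvStepB orgl (ptr, hits, pre) c
          = (ptr.insert c j, hits + 1, (pvOcc orgl c)[j] + 1) := by
        simp only [pvStepB, ← hjdef]
        rw [dif_pos hcase]
      have hAstep : pvStepA orgl (acc, pre) c
          = (acc ++ [(pvOcc orgl c)[j]], (pvOcc orgl c)[j] + 1) := by
        simp only [pvStepA, hff]
        rw [max_eq_right hpj]
      rw [hBstep, hAstep]
      apply ih
      · omega
      · intro c'
        by_cases hc' : c' = c
        · subst hc'
          rw [PySem.Dict.getD_insert, if_pos rfl]
          exact ⟨le_of_lt hcase, fun i hi hij => by have := h3 i hi hij; omega⟩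
        · rw [PySem.Dict.getD_insert, if_neg hc']
          obtain ⟨ha, hb⟩ := hinv c'
          exact ⟨ha, fun i hi hij => by have := hb i hi hij; omega⟩
      · rw [List.filter_append]
        have : ((pvOcc orgl c)[j] ≠ (-1 : Int)) := by omega
        simp [this, hhits]
    · rw [dif_neg hcase] at hff
      set j := pvAdvance (pvOcc orgl c) (ptr.getD c 0) pre with hjdef
      have hBstep : pvStepB orgl (ptr, hits, pre) c = (ptr.insert c j, hits, pre + 1) := by
        simp only [pvStepB, ← hjdef]
        rw [dif_neg hcase]
      have hAstep : pvStepA orgl (acc, pre) c = (acc ++ [(-1 : Int)], pre + 1) := by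
        simp only [pvStepA, hff]
        rw [max_eq_left (by omega)]
      rw [hBstep, hAstep]
      apply ih
      · omega
      · intro c'
        by_cases hc' : c' = c
        · subst hc'
          rw [PySem.Dict.getD_insert, if_pos rfl]
          refine ⟨by omega, fun i hi hij => ?_⟩
          have := h3 i hi (by omega)
          omega
        · rw [PySem.Dict.getD_insert, if_neg hc']
          obtain ⟨ha, hb⟩ := hinv c'
          exact ⟨ha, fun i hi hij => by have := hb i hi hij; omega⟩
      · rw [List.filter_append]
        simp [hhits]


-- ===== VERDICT (by name: the statement is the Claim_ definition above) =====
theorem compare_by_shape_spec : Claim_equal_compare_by_shape := by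
  intro org ticker hdom hpre
  unfold Spec_compare_by_shape
  have hl : ticker.toList ≠ [] := by
    intro h
    exact hpre (by simpa using String.toList_eq_nil_iff.mp h)
  obtain ⟨t0, rest, htl⟩ := List.exists_cons_of_ne_nil hl
  unfold compare_by_shape compare_by_shape_alt
  rw [show PySem.Str.pyGet? ticker 0 = some t0 by
    simp [PySem.Str.pyGet?_eq, htl, PySem.List.pyGet?, PySem.List.pyIdx?]]
  by_cases hf : PySem.Chars.find org.toList [PySem.Chars.lowerChar t0] = -1
  · simp [hf]
  · simp only [hf, ne_eq, not_false_iff, if_true, if_neg]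
    have hf0 : 0 ≤ PySem.Chars.find org.toList [PySem.Chars.lowerChar t0] := by
      have := PySem.Chars.neg_one_le_find org.toList [PySem.Chars.lowerChar t0]
      omega
    set orgl := PySem.Chars.lower org.toList with horgl
    set f := PySem.Chars.find org.toList [PySem.Chars.lowerChar t0] with hfdef
    have hstepB : (fun (st : PySem.Dict Char Nat × Int × Int) c =>
        let lst := ((PySem.List.enumerate orgl).foldl
          (fun (d : PySem.Dict Char (List Int)) p => d.modify p.2 [] (· ++ [p.1]))
          PySem.Dict.empty).getD c []
        let j := pvAdvance lst (st.1.getD c 0) st.2.2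
        let ptr' := st.1.insert c j
        if h : j < lst.length then (ptr', st.2.1 + 1, lst[j] + 1)
        else (ptr', st.2.1, st.2.2 + 1))
        = pvStepB orgl := by
      funext st c
      simp only [pvPos_getD orgl c]
      rfl
    have hstepA : (fun (st : List Int × Int) c =>
        (st.1 ++ [PySem.Chars.findFrom orgl [c] st.2 none],
         max st.2 (PySem.Chars.findFrom orgl [c] st.2 none) + 1)) = pvStepA orgl := rfl
    rw [hstepB, hstepA]
    have hcount := pvLoop_agree orgl (PySem.Chars.lower (List.drop 1 ticker.toList))
      [0] (f + 1) PySem.Dict.empty 1 (by omega)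
      (fun c => by
        rw [PySem.Dict.getD_empty]
        exact ⟨Nat.zero_le _, fun i hi hij => absurd hij (Nat.not_lt_zero i)⟩)
      (by simp)
    rw [hcount]
    simp
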